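-- pv_equiv track=rewrite | github.com/jmplz14/PTC-programacion-tecnica-y-cientifica | Sesion3/ejercicio10.py | es_inversa
-- ===== SOURCE A (Python) =====
-- def es_inversa(palabra1, palabra2):
--     tam1 = len(palabra1)
--     tam2 = len(palabra2)
--     i = 0
--     j = -1
--     if (tam1 == tam2):
--         iguales = True
--         while i < tam1 and iguales:
--             if (palabra1[i] != palabra2[ (i+1) * -1]):
--                 iguales = False
--             i += 1
--             j -= 1
--         return iguales
--     else:
--         return False
-- ===== SOURCE B (Python) =====
-- def es_inversa(palabra1, palabra2):
--     return palabra1 == palabra2[::-1]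
-- ===== Notes on version B (the rewrite author's own statement) =====
-- stated objective: idiomatic
-- what changed: Replaces the length guard plus two-index while loop with an early-exit flag by building the reversed second string with one slice and comparing for equality.
import Mathlib
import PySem

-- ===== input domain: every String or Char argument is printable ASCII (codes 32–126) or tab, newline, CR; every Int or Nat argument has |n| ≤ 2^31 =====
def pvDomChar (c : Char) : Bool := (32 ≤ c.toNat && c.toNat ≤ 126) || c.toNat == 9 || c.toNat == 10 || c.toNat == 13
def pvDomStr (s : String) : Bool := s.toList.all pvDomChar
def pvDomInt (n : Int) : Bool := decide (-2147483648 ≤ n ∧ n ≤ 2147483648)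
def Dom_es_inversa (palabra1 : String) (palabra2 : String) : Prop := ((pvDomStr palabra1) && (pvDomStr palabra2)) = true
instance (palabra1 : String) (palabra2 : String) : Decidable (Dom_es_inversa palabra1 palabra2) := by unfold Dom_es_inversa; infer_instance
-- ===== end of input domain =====

-- B replaces A's length guard and two-index while loop with reverse-and-compare (idiomatic, same cost).


-- ===== PORT A =====
-- while i < tam1 and iguales: compare palabra1[i] with palabra2[(i+1)*-1]; fuel = tam1 suffices
def esInvLoopA (l1 l2 : List Char) (tam1 : Nat) (i : Nat) (iguales : Bool) : Nat → Bool
  | 0 => iguales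
  | f + 1 =>
    if i < tam1 && iguales then
      let iguales' := if PySem.List.pyGet? l1 (i : Int) ≠ PySem.List.pyGet? l2 (((i : Int) + 1) * (-1)) then false else iguales
      esInvLoopA l1 l2 tam1 (i + 1) iguales' f
    else iguales

def es_inversa (palabra1 : String) (palabra2 : String) : Bool :=
  let l1 := palabra1.toList
  let l2 := palabra2.toList
  let tam1 := l1.length
  let tam2 := l2.length
  if tam1 = tam2 then esInvLoopA l1 l2 tam1 0 true tam1
  else false

-- ===== PORT B =====
def es_inversa_alt (palabra1 : String) (palabra2 : String) : Bool :=
  palabra1.toList == palabra2.toList.reverse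

-- ===== PRECONDITION & SPEC =====
def Spec_es_inversa (palabra1 : String) (palabra2 : String) (out : Bool) : Prop := out = es_inversa_alt palabra1 palabra2
instance (palabra1 : String) (palabra2 : String) (out : Bool) : Decidable (Spec_es_inversa palabra1 palabra2 out) := by unfold Spec_es_inversa; infer_instance

-- ===== CLAIM (what is proved, stated in full; the proofs are below) =====
def Claim_equal_es_inversa : Prop := ∀ (palabra1 : String) (palabra2 : String), Dom_es_inversa palabra1 palabra2 → Spec_es_inversa palabra1 palabra2 (es_inversa palabra1 palabra2)

-- ===== LEMMAS AND PROOFS =====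

theorem esInvLoopA_false (l1 l2 : List Char) (tam1 i f : Nat) :
    esInvLoopA l1 l2 tam1 i false f = false := by
  cases f <;> simp [esInvLoopA]

theorem esInvLoopA_eq (l1 l2 : List Char) (n : Nat) (h1 : l1.length = n) (h2 : l2.length = n)
    (f i : Nat) (hf : i + f = n) :
    esInvLoopA l1 l2 n i true f = (l1.drop i == (l2.reverse).drop i) := by
  induction f generalizing i with
  | zero =>
    have hi : i = n := by omega
    simp [esInvLoopA, hi, List.drop_of_length_le, h1, h2]
  | succ f ih =>
    have hi : i < n := by omega
    have hi1 : i < l1.length := by omega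
    have hir : i < l2.reverse.length := by rw [List.length_reverse, h2]; exact hi
    have hg1 : PySem.List.pyGet? l1 (i : Int) = some l1[i] := by
      rw [PySem.List.pyGet?_natCast]; exact List.getElem?_eq_getElem hi1
    have hg2 : PySem.List.pyGet? l2 (((i : Int) + 1) * (-1)) = some (l2.reverse)[i] := by
      have : ((i : Int) + 1) * (-1) = -(((i + 1 : Nat) : Int)) := by push_cast; ring
      rw [this, PySem.List.pyGet?_neg_natCast l2 (i + 1) (by omega) (by omega)]
      rw [List.getElem?_eq_getElem (by omega)]
      congr 1
      rw [List.getElem_reverse]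
      congr 1
      omega
    have hd1 : l1.drop i = l1[i] :: l1.drop (i + 1) := List.drop_eq_getElem_cons hi1
    have hd2 : (l2.reverse).drop i = (l2.reverse)[i] :: (l2.reverse).drop (i + 1) :=
      List.drop_eq_getElem_cons hir
    simp only [esInvLoopA, hi, decide_true, Bool.and_true, if_pos, hg1, hg2]
    by_cases hc : l1[i] = (l2.reverse)[i]
    · rw [if_neg (fun h => h (congrArg some hc))]
      rw [ih (i + 1) (by omega), hd1, hd2]
      simp [hc]
    · rw [if_pos (fun h => hc (Option.some.inj h)), esInvLoopA_false, hd1, hd2]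
      symm
      rw [beq_eq_false_iff_ne]
      intro h
      exact hc (List.cons_eq_cons.mp h).1

theorem es_inversa_eq_alt (palabra1 palabra2 : String) :
    es_inversa palabra1 palabra2 = es_inversa_alt palabra1 palabra2 := by
  unfold es_inversa es_inversa_alt
  set l1 := palabra1.toList
  set l2 := palabra2.toList
  by_cases h : l1.length = l2.length
  · simp only [h, if_pos]
    rw [esInvLoopA_eq l1 l2 l2.length h rfl l2.length 0 (by omega)]
    simp
  · simp only [h, if_false]
    symm
    rw [beq_eq_false_iff_ne]
    intro he
    apply h
    rw [he, List.length_reverse]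

-- ===== VERDICT (by name: the statement is the Claim_ definition above) =====
theorem es_inversa_spec : Claim_equal_es_inversa := by
  intro p1 p2 _
  unfold Spec_es_inversa
  exact es_inversa_eq_alt p1 p2
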